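-- pv_equiv track=rewrite | github.com/igorvanloo/Project-Euler-Explained | Euler Problem 00148 - Exploring Pascals Triangle.py | findprod
-- ===== SOURCE A (Python) =====
-- def findprod(x, prime):
--     i = 0
--     while prime**i <= x:
--         i += 1
--
--     total = 1
--     while x != 0:
--         n = x // (prime**i)
--         x -= n*(prime**i)
--         i -= 1
--         total *= (n+1)
--
--     return total
-- ===== SOURCE B (Python) =====
-- def findprod(x, prime):
--     # One least-significant-first digit loop; only loops for a valid base (prime > 1).
--     total = 1
--     while x >= prime > 1:
--         total *= x % prime + 1
--         x //= prime
--     return total * (x + 1)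
-- ===== Notes on version B (the rewrite author's own statement) =====
-- stated objective: simpler
-- what changed: Replaces A's two loops (a power search for the first prime**i exceeding x, then a most-significant-first descending division loop recomputing prime**i each step) with one least-significant-first loop that strips digits via x % prime and x //= prime while x >= prime > 1 and finally multiplies by (leading value + 1); …
-- outside the precondition, e.g. on findprod(4, -2): A returns 0, B returns 5; on findprod(2, 1): A does not finish within the time limit, B returns 3; on findprod(3, 0): A does not finish within the time limit, B returns 4
import Mathlib
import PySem

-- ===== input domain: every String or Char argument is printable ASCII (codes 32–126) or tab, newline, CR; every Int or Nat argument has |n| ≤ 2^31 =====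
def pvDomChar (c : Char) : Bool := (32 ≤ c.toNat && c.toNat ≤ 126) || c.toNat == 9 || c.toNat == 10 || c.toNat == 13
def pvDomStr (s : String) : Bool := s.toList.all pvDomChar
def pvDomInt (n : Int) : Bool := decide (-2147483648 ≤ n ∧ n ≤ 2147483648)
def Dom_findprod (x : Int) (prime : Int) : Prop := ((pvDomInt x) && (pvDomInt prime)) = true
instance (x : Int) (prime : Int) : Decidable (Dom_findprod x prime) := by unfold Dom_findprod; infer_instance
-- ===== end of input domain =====

-- B replaces A's two loops (power search + most-significant-first division) by one
-- least-significant-first modulo/division digit loop; simpler, same asymptotic cost.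

-- ===== PORT A =====
-- while prime**i <= x: i += 1   (fuel bounds the iteration count; unreachable on Pre_)
def findprodLoop1 : Nat → Int → Int → Nat → Nat
  | 0, _, _, i => i
  | fuel + 1, x, prime, i =>
      if prime ^ i ≤ x then findprodLoop1 fuel x prime (i + 1) else i

-- while x != 0: n = x // prime**i; x -= n*prime**i; i -= 1; total *= n+1
def findprodLoop2 : Nat → Int → Int → Nat → Int → Int
  | 0, _, _, _, total => total
  | fuel + 1, x, prime, i, total =>
      if x = 0 then total
      else
        findprodLoop2 fuel (x - PySem.Int.floordiv x (prime ^ i) * (prime ^ i)) prime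
          (i - 1) (total * (PySem.Int.floordiv x (prime ^ i) + 1))

def findprod (x : Int) (prime : Int) : Int :=
  let i := findprodLoop1 (x.toNat + 2) x prime 0
  findprodLoop2 (i + 1) x prime i 1

-- ===== PORT B =====
-- total = 1; while x >= prime > 1: total *= x % prime + 1; x //= prime; return total * (x + 1)
def findprodAltLoop : Nat → Int → Int → Int → Int
  | 0, x, _, total => total * (x + 1)
  | fuel + 1, x, prime, total =>
      if prime ≤ x ∧ 1 < prime then
        findprodAltLoop fuel (PySem.Int.floordiv x prime) prime
          (total * (PySem.Int.mod x prime + 1))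
      else total * (x + 1)

def findprod_alt (x : Int) (prime : Int) : Int :=
  findprodAltLoop (x.toNat + 2) x prime 1

-- ===== PRECONDITION & SPEC =====
-- Pre_ excludes only positive x with prime <= 1, where a base-prime digit expansion
-- does not exist: there A's power search diverges for prime in {-1, 0, 1}, and for
-- prime <= -2 A returns an accidental value of its greedy loop (negative-base
-- quotients), a corner no one would specify either way.
def Pre_findprod (x : Int) (prime : Int) : Prop := 2 ≤ prime ∨ x ≤ 0
instance (x : Int) (prime : Int) : Decidable (Pre_findprod x prime) := by
  unfold Pre_findprod; infer_instance

def pvWitness_findprod : Int × Int := (10, 2)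

def Spec_findprod (x : Int) (prime : Int) (out : Int) : Prop := out = findprod_alt x prime
instance (x : Int) (prime : Int) (out : Int) : Decidable (Spec_findprod x prime out) := by
  unfold Spec_findprod; infer_instance

-- ===== CLAIM (what is proved, stated in full; the proofs are below) =====
def Claim_equal_findprod : Prop :=
  ∀ (x : Int) (prime : Int), Dom_findprod x prime → Pre_findprod x prime →
    Spec_findprod x prime (findprod x prime)

-- ===== LEMMAS AND PROOFS =====

-- product of (base-p digit + 1), the common mathematical value of both loops
def digitProd (p : Nat) (n : Nat) : Nat :=
  if h : n = 0 ∨ p < 2 then 1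
  else (n % p + 1) * digitProd p (n / p)
termination_by n
decreasing_by
  exact Nat.div_lt_self (Nat.pos_of_ne_zero (by omega)) (by omega)

theorem digitProd_zero (p : Nat) : digitProd p 0 = 1 := by
  rw [digitProd]; simp

theorem digitProd_step (p n : Nat) (hp : 2 ≤ p) :
    digitProd p n = (n % p + 1) * digitProd p (n / p) := by
  by_cases hn : n = 0
  · subst hn; simp [digitProd_zero]
  · rw [digitProd]; simp [hn, show ¬ p < 2 by omega]

-- stripping the top digit: n < p, r < p^i  ⇒  digitProd p (n*p^i + r) = (n+1) * digitProd p r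
theorem digitProd_strip (p : Nat) (hp : 2 ≤ p) :
    ∀ (i n r : Nat), n < p → r < p ^ i →
      digitProd p (n * p ^ i + r) = (n + 1) * digitProd p r := by
  intro i
  induction i with
  | zero =>
    intro n r hn hr
    have hr0 : r = 0 := by
      have h1 : p ^ 0 = 1 := pow_zero p
      omega
    subst hr0
    simp only [pow_zero, mul_one, Nat.add_zero]
    by_cases h0 : n = 0
    · simp [h0, digitProd_zero]
    · rw [digitProd_step p n hp, Nat.mod_eq_of_lt hn,
        Nat.div_eq_of_lt hn, digitProd_zero]
  | succ j ih =>
    intro n r hn hr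
    by_cases hx : n * p ^ (j + 1) + r = 0
    · have hq : 0 < p ^ (j + 1) := Nat.pow_pos (by omega)
      have hr0 : r = 0 := by omega
      have hn0 : n = 0 := by
        rcases Nat.mul_eq_zero.mp (by omega : n * p ^ (j + 1) = 0) with h | h
        · exact h
        · omega
      simp [hn0, hr0, digitProd_zero]
    · have hmod : (n * p ^ (j + 1) + r) % p = r % p := by
        have : n * p ^ (j + 1) = n * p ^ j * p := by ring
        rw [this, Nat.add_comm, Nat.add_mul_mod_self_right]
      have hdiv : (n * p ^ (j + 1) + r) / p = n * p ^ j + r / p := by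
        have : n * p ^ (j + 1) + r = r + n * p ^ j * p := by ring
        rw [this, Nat.add_mul_div_right _ _ (by omega : 0 < p), Nat.add_comm]
      have hrdiv : r / p < p ^ j :=
        Nat.div_lt_of_lt_mul (by rw [Nat.mul_comm]; exact hr)
      rw [digitProd_step p _ hp, hmod, hdiv, ih n (r / p) hn hrdiv,
        digitProd_step p r hp]
      ring

-- B's loop computes total * digitProd, given enough fuel
theorem altLoop_eq (p : Nat) (hp : 2 ≤ p) :
    ∀ (fuel n : Nat) (total : Int), n < fuel →
      findprodAltLoop fuel (n : Int) (p : Int) total = total * (digitProd p n : Int) := by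
  intro fuel
  induction fuel with
  | zero => intro n total h; omega
  | succ f ih =>
    intro n total h
    have h1p : (1 : Int) < (p : Int) := by exact_mod_cast hp
    by_cases hle : (p : Int) ≤ (n : Int)
    · have hpn : p ≤ n := by exact_mod_cast hle
      rw [findprodAltLoop, if_pos ⟨hle, h1p⟩, PySem.Int.floordiv_natCast,
        PySem.Int.mod_natCast,
        ih (n / p) _ (by
          have : n / p < n := Nat.div_lt_self (by omega) (by omega)
          omega),
        digitProd_step p n hp]
      push_cast
      ring
    · have hnp : n < p := by exact_mod_cast not_le.mp hle
      rw [findprodAltLoop, if_neg (by tauto)]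
      by_cases hn : n = 0
      · simp [hn, digitProd_zero]
      · rw [digitProd_step p n hp, Nat.mod_eq_of_lt hnp, Nat.div_eq_of_lt hnp,
          digitProd_zero]
        push_cast
        ring

-- A's second loop computes total * digitProd, when n < p^(i+1) and fuel = i+1
theorem loop2_eq (p : Nat) (hp : 2 ≤ p) :
    ∀ (i n : Nat) (total : Int), n < p ^ (i + 1) →
      findprodLoop2 (i + 1) (n : Int) (p : Int) i total = total * (digitProd p n : Int) := by
  intro i
  induction i with
  | zero =>
    intro n total hlt
    by_cases hn : n = 0
    · subst hn; simp [findprodLoop2, digitProd_zero]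
    · have hcast : (n : Int) ≠ 0 := by exact_mod_cast hn
      have hnp : n < p := by simpa using hlt
      have h1 : PySem.Int.floordiv (n : Int) 1 = (n : Int) := by
        rw [PySem.Int.floordiv_eq_ediv_of_pos (by omega)]; simp
      rw [findprodLoop2, if_neg hcast]
      simp only [pow_zero, h1, mul_one, sub_self]
      rw [findprodLoop2]
      have : digitProd p n = n + 1 := by
        have := digitProd_strip p hp 0 n 0 hnp (by simp)
        simpa [digitProd_zero] using this
      rw [this]; push_cast; ring
  | succ j ih =>
    intro n total hlt
    by_cases hn : n = 0
    · subst hn; simp [findprodLoop2, digitProd_zero]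
    · have hcast : (n : Int) ≠ 0 := by exact_mod_cast hn
      rw [findprodLoop2, if_neg hcast]
      have hpow : ((p : Int)) ^ (j + 1) = ((p ^ (j + 1) : Nat) : Int) := by push_cast; ring
      rw [hpow, PySem.Int.floordiv_natCast n (p ^ (j + 1))]
      have hdm : ((p ^ (j + 1) : Nat) : Int) * ((n / p ^ (j + 1) : Nat) : Int)
          + ((n % p ^ (j + 1) : Nat) : Int) = (n : Int) := by
        exact_mod_cast congrArg (Nat.cast : Nat → Int) (Nat.div_add_mod n (p ^ (j + 1)))
      have hx' : (n : Int) - ((n / p ^ (j + 1) : Nat) : Int) * ((p ^ (j + 1) : Nat) : Int)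
          = ((n % p ^ (j + 1) : Nat) : Int) := by linear_combination -hdm
      rw [hx']
      have hi : (j + 1 - 1) = j := by omega
      rw [hi, ih (n % p ^ (j + 1)) _ (Nat.mod_lt _ (Nat.pow_pos (show 0 < p by omega)))]
      have hndiv : n / p ^ (j + 1) < p := by
        apply Nat.div_lt_of_lt_mul
        calc n < p ^ (j + 2) := hlt
        _ = p ^ (j + 1) * p := by ring
      have hstrip := digitProd_strip p hp (j + 1) (n / p ^ (j + 1)) (n % p ^ (j + 1))
        hndiv (Nat.mod_lt _ (Nat.pow_pos (show 0 < p by omega)))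
      rw [Nat.div_add_mod'] at hstrip
      rw [hstrip]
      push_cast
      ring

-- A's first loop finds an i with n < p^i, given fuel covering the search
theorem loop1_bound (p : Nat) :
    ∀ (fuel i n : Nat), n < p ^ (i + fuel) →
      n < p ^ (findprodLoop1 fuel (n : Int) (p : Int) i) := by
  intro fuel
  induction fuel with
  | zero => intro i n h; simpa using h
  | succ f ih =>
    intro i n h
    rw [findprodLoop1]
    by_cases hle : ((p : Int)) ^ i ≤ (n : Int)
    · rw [if_pos hle]
      exact ih (i + 1) n (by rw [show i + 1 + f = i + (f + 1) by omega]; exact h)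
    · rw [if_neg hle]
      have : ¬ (p ^ i ≤ n) := by
        intro hc; exact hle (by exact_mod_cast hc)
      omega

theorem lt_pow_fuel (p n : Nat) (hp : 2 ≤ p) : n < p ^ (n + 2) := by
  calc n < 2 ^ n := Nat.lt_two_pow_self
  _ ≤ 2 ^ (n + 2) := Nat.pow_le_pow_right (by omega) (by omega)
  _ ≤ p ^ (n + 2) := Nat.pow_le_pow_left hp _

-- on x ≤ 0 both sides return x + 1 for every prime
theorem nonpos_case_eq (x prime : Int) (hx : x ≤ 0) :
    findprod x prime = findprod_alt x prime := by
  have htn : x.toNat = 0 := Int.toNat_of_nonpos hx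
  have h1 : ¬ ((1 : Int) ≤ x) := by omega
  have hb : ¬ (prime ≤ x ∧ 1 < prime) := by omega
  unfold findprod findprod_alt
  rw [htn]
  have hl1 : findprodLoop1 (0 + 2) x prime 0 = 0 := by
    rw [findprodLoop1, if_neg (by simpa using h1)]
  rw [hl1, findprodAltLoop, if_neg hb]
  by_cases h0 : x = 0
  · rw [findprodLoop2, if_pos h0, h0]; ring
  · rw [findprodLoop2, if_neg h0, findprodLoop2]
    simp

-- ===== VERDICT (by name: the statement is the Claim_ definition above) =====
theorem findprod_spec : Claim_equal_findprod := by
  intro x prime _ hpre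
  unfold Spec_findprod
  by_cases hx : x ≤ 0
  · exact nonpos_case_eq x prime hx
  · have hp2 : 2 ≤ prime := by
      rcases hpre with h | h
      · exact h
      · omega
    have hx0 : 0 ≤ x := by omega
    obtain ⟨n, rfl⟩ : ∃ n : Nat, x = (n : Int) := ⟨x.toNat, (Int.toNat_of_nonneg hx0).symm⟩
    obtain ⟨p, rfl⟩ : ∃ q : Nat, prime = (q : Int) :=
      ⟨prime.toNat, (Int.toNat_of_nonneg (by omega)).symm⟩
    have hp : 2 ≤ p := by exact_mod_cast hp2
    have htn : ((n : Int)).toNat = n := Int.toNat_natCast n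
    unfold findprod findprod_alt
    rw [htn]
    set i0 := findprodLoop1 (n + 2) (n : Int) (p : Int) 0 with hi0
    have hbound : n < p ^ i0 := by
      apply loop1_bound p (n + 2) 0 n
      simpa using lt_pow_fuel p n hp
    have hb2 : n < p ^ (i0 + 1) :=
      lt_of_lt_of_le hbound (Nat.pow_le_pow_right (by omega) (by omega))
    rw [loop2_eq p hp i0 n 1 hb2, altLoop_eq p hp (n + 2) n 1 (by omega)]
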